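-- pv_equiv track=rewrite | github.com/pypi-data/pypi-mirror-27 | packages/gkraz/gkraz-0.1.tar.gz/gkraz-0.1/gkraz/__main__.py | index_split
-- ===== SOURCE A (Python) =====
-- def index_split(str):
--     tokens = []
--     indices = []
--
--     in_tok = False
--     for i,c in enumerate(str):
--         if not in_tok:
--             if not c.isspace():
--                 tokens.append(c)
--                 indices.append(i)
--                 in_tok = True
--         else:
--             if c.isspace():
--                 in_tok = False
--             else:
--                 tokens[-1] += c
--
--     return tokens,indices
-- ===== SOURCE B (Python) =====
-- from itertools import groupby
--
--
-- def index_split(str):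
--     tokens = []
--     indices = []
--     for is_ws, grp in groupby(enumerate(str), key=lambda p: p[1].isspace()):
--         if not is_ws:
--             grp = list(grp)
--             indices.append(grp[0][0])
--             tokens.append(''.join(c for _, c in grp))
--     return tokens, indices
-- ===== Notes on version B (the rewrite author's own statement) =====
-- stated objective: faster
-- what changed: Replaces A's in_tok boolean state machine that grows the last token string char-by-char (tokens[-1] += c, rebuilding the string each time) with itertools.groupby over enumerate(str) keyed on isspace, emitting each non-whitespace run joined into one string at once, with its first index.
import Mathlib
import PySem

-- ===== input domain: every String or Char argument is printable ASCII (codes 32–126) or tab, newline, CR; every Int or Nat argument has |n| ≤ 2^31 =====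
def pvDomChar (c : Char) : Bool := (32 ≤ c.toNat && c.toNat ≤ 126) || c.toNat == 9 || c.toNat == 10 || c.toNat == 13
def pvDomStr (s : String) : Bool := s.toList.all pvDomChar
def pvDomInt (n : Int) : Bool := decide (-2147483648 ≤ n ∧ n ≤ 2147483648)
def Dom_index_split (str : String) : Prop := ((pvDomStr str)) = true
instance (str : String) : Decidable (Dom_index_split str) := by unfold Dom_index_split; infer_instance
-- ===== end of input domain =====

-- B replaces A's in_tok state machine (which grows the last token string char-by-char) by itertools.groupby over enumerate(str) keyed on isspace, joining each run at once (objective: faster, measured).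
-- Tokens are built as List Char and turned into String at the end (String.ofList); this is the PySem string-building convention.

-- ===== PORT A =====
-- tokens[-1] += c : append the char to the last token
def pvAppendLast : List (List Char) → Char → List (List Char)
  | [], _ => []
  | [t], c => [t ++ [c]]
  | t :: ts, c => t :: pvAppendLast ts c

def pvStepA (st : List (List Char) × List Int × Bool) (p : Int × Char) :
    List (List Char) × List Int × Bool :=
  let (toks, inds, inTok) := st
  let (i, c) := p
  if !inTok then
    if !(PySem.Chars.isspace c) then (toks ++ [[c]], inds ++ [i], true) else (toks, inds, inTok)
  else
    if PySem.Chars.isspace c then (toks, inds, false)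
    else (pvAppendLast toks c, inds, inTok)

def index_split (str : String) : List String × List Int :=
  let r := (PySem.List.enumerate str.toList).foldl pvStepA ([], [], false)
  (r.1.map String.ofList, r.2.1)

-- ===== PORT B =====
-- itertools.groupby(enumerate(str), key = isspace of the char): consecutive runs with their key
def pvGroups : List (Int × Char) → List (Bool × List (Int × Char))
  | [] => []
  | p :: rest =>
    match pvGroups rest with
    | [] => [(PySem.Chars.isspace p.2, [p])]
    | (k, g) :: gs =>
      if PySem.Chars.isspace p.2 = k then (k, p :: g) :: gs
      else (PySem.Chars.isspace p.2, [p]) :: (k, g) :: gs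

-- the loop body: skip whitespace groups; else append grp[0][0] and ''.join of the chars
def pvStepB (acc : List (List Char) × List Int) (g : Bool × List (Int × Char)) :
    List (List Char) × List Int :=
  if g.1 then acc
  else (acc.1 ++ [g.2.map (·.2)], acc.2 ++ [(g.2.headD (0, ' ')).1])

def index_split_alt (str : String) : List String × List Int :=
  let r := (pvGroups (PySem.List.enumerate str.toList)).foldl pvStepB ([], [])
  (r.1.map String.ofList, r.2)

-- ===== PRECONDITION & SPEC =====
def Spec_index_split (str : String) (out : List String × List Int) : Prop := out = index_split_alt str
instance (str : String) (out : List String × List Int) : Decidable (Spec_index_split str out) := by unfold Spec_index_split; infer_instance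

-- ===== CLAIM (what is proved, stated in full; the proofs are below) =====
def Claim_equal_index_split : Prop := ∀ (str : String), Dom_index_split str → Spec_index_split str (index_split str)

-- ===== LEMMAS AND PROOFS =====

theorem pvAppendLast_snoc (toks : List (List Char)) (cur : List Char) (c : Char) :
    pvAppendLast (toks ++ [cur]) c = toks ++ [cur ++ [c]] := by
  induction toks with
  | nil => rfl
  | cons t ts ih =>
    cases ts with
    | nil => simp [pvAppendLast]
    | cons t' ts' => simpa [pvAppendLast] using ih

-- main invariant: A's fold and B's fold-over-groups agree, in both loop states of A
theorem pv_key (l : List (Int × Char)) :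
    (∀ toks inds,
      (((l.foldl pvStepA (toks, inds, false)).1, (l.foldl pvStepA (toks, inds, false)).2.1)
        = (pvGroups l).foldl pvStepB (toks, inds))) ∧
    (∀ toks inds (cur : List Char) (i : Int),
      (((l.foldl pvStepA (toks ++ [cur], inds ++ [i], true)).1,
        (l.foldl pvStepA (toks ++ [cur], inds ++ [i], true)).2.1)
        = match pvGroups l with
          | (false, g) :: gs => gs.foldl pvStepB (toks ++ [cur ++ g.map (·.2)], inds ++ [i])
          | gs => gs.foldl pvStepB (toks ++ [cur], inds ++ [i]))) := by
  induction l with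
  | nil => exact ⟨fun _ _ => rfl, fun _ _ _ _ => rfl⟩
  | cons p r ih =>
    obtain ⟨iha, ihb⟩ := ih
    obtain ⟨j, c⟩ := p
    by_cases hc : PySem.Chars.isspace c = true
    · constructor
      · intro toks inds
        have h1 : (((j, c) :: r).foldl pvStepA (toks, inds, false))
            = r.foldl pvStepA (toks, inds, false) := by
          simp [List.foldl_cons, pvStepA, hc]
        rw [h1, iha]
        -- RHS: head group of pvGroups ((j,c)::r) has key true, pvStepB skips it
        show _ = (pvGroups ((j, c) :: r)).foldl pvStepB (toks, inds)
        rcases hgr : pvGroups r with _ | ⟨⟨k, g⟩, gs⟩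
        · simp [pvGroups, hgr, pvStepB, hc]
        · cases k
          · simp [pvGroups, hgr, hc, pvStepB]
          · simp [pvGroups, hgr, hc, pvStepB]
      · intro toks inds cur i
        have h1 : (((j, c) :: r).foldl pvStepA (toks ++ [cur], inds ++ [i], true))
            = r.foldl pvStepA (toks ++ [cur], inds ++ [i], false) := by
          simp [List.foldl_cons, pvStepA, hc]
        rw [h1, iha]
        rcases hgr : pvGroups r with _ | ⟨⟨k, g⟩, gs⟩
        · simp [pvGroups, hgr, pvStepB, hc]
        · cases k
          · simp [pvGroups, hgr, hc, pvStepB]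
          · simp [pvGroups, hgr, hc, pvStepB]
    · -- c is not whitespace
      constructor
      · intro toks inds
        have h1 : (((j, c) :: r).foldl pvStepA (toks, inds, false))
            = r.foldl pvStepA (toks ++ [[c]], inds ++ [j], true) := by
          simp [List.foldl_cons, pvStepA, hc]
        rw [h1, ihb toks inds [c] j]
        rcases hgr : pvGroups r with _ | ⟨⟨k, g⟩, gs⟩
        · simp [pvGroups, hgr, pvStepB, hc]
        · cases k
          · simp [pvGroups, hgr, hc, pvStepB]
          · simp [pvGroups, hgr, hc, pvStepB]
      · intro toks inds cur i
        have h1 : (((j, c) :: r).foldl pvStepA (toks ++ [cur], inds ++ [i], true))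
            = r.foldl pvStepA (toks ++ [cur ++ [c]], inds ++ [i], true) := by
          simp [List.foldl_cons, pvStepA, hc, pvAppendLast_snoc]
        rw [h1, ihb toks inds (cur ++ [c]) i]
        rcases hgr : pvGroups r with _ | ⟨⟨k, g⟩, gs⟩
        · simp [pvGroups, hgr, hc]
        · cases k
          · simp [pvGroups, hgr, hc]
          · simp [pvGroups, hgr, hc]

-- ===== VERDICT (by name: the statement is the Claim_ definition above) =====
theorem index_split_spec : Claim_equal_index_split := by
  intro str _
  unfold Spec_index_split index_split index_split_alt
  have h := (pv_key (PySem.List.enumerate str.toList)).1 [] []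
  have h1 := congrArg Prod.fst h
  have h2 := congrArg Prod.snd h
  simp only at h1 h2
  simp [h1, h2]
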